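-- pv_equiv track=rewrite | github.com/ShivangNagta/Oceanverse | mid.py | right
-- ===== SOURCE A (Python) =====
-- def right(pattern):   #defining the function, taking input a string
--     new=''            #an empty string to append the new pattern
--     for i in pattern:  # loop for changing the old pattern to the new one
--         if i=='D':     #converting D to L
--             new+='L'
--         if i=='R':     #converting R to D
--             new+='D'
--         if i=='U':     #converting U to R
--             new+='R'
--         if i=='L':     #converting L to U
--             new+='U'
--     new1=''          #another string to append the new reversed pattern
--     for i in new:     # loop for changing the old pattern to the new one
--         if i=='D':     #converting D to R
--             new1+='U'
--         if i=='R':     #not changing R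
--             new1+='R'
--         if i=='U':     #converting U to D
--             new1+='D'
--         if i=='L':     #not changing L
--             new1+='L'
--     return new1     #returning the new string
-- ===== SOURCE B (Python) =====
-- # B: single pass with the composed substitution map; drops chars outside the map like A.
-- _M = {'D': 'L', 'R': 'U', 'U': 'R', 'L': 'D'}
--
-- def right(pattern):
--     return ''.join(_M[c] for c in pattern if c in _M)
-- ===== Notes on version B (the rewrite author's own statement) =====
-- stated objective: simpler
-- what changed: Replaces A's two sequential substitution passes through an intermediate string with one pass over the input using the precomposed map {'D':'L','R':'U','U':'R','L':'D'}, dropping other characters.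
import Mathlib
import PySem

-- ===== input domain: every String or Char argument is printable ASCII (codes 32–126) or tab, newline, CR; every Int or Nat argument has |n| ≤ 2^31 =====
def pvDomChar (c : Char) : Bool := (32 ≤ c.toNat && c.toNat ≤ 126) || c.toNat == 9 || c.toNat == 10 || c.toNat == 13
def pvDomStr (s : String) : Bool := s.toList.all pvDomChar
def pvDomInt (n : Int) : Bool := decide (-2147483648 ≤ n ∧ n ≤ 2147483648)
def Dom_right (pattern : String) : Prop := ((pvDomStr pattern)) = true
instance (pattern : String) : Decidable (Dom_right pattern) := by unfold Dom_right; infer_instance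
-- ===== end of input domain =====

-- ===== PORT A =====
-- B replaces A's two sequential substitution passes (via an intermediate string) with one
-- pass using the precomposed map; objective: simpler.
def rightStep1 (acc : List Char) (i : Char) : List Char :=
  let acc := if i = 'D' then acc ++ ['L'] else acc
  let acc := if i = 'R' then acc ++ ['D'] else acc
  let acc := if i = 'U' then acc ++ ['R'] else acc
  let acc := if i = 'L' then acc ++ ['U'] else acc
  acc

def rightStep2 (acc : List Char) (i : Char) : List Char :=
  let acc := if i = 'D' then acc ++ ['U'] else acc
  let acc := if i = 'R' then acc ++ ['R'] else acc
  let acc := if i = 'U' then acc ++ ['D'] else acc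
  let acc := if i = 'L' then acc ++ ['L'] else acc
  acc

def right (pattern : String) : String :=
  let new := pattern.toList.foldl rightStep1 []
  let new1 := new.foldl rightStep2 []
  String.mk new1

-- ===== PORT B =====
def rightMap? (c : Char) : Option Char :=
  if c = 'D' then some 'L'
  else if c = 'R' then some 'U'
  else if c = 'U' then some 'R'
  else if c = 'L' then some 'D'
  else none

def right_alt (pattern : String) : String :=
  String.mk (pattern.toList.filterMap rightMap?)

-- ===== PRECONDITION & SPEC =====
def Spec_right (pattern : String) (out : String) : Prop := out = right_alt pattern
instance (pattern : String) (out : String) : Decidable (Spec_right pattern out) := by unfold Spec_right; infer_instance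

-- ===== CLAIM (what is proved, stated in full; the proofs are below) =====
def Claim_equal_right : Prop := ∀ (pattern : String), Dom_right pattern → Spec_right pattern (right pattern)

-- ===== LEMMAS AND PROOFS =====
def rightF1 (c : Char) : Option Char :=
  if c = 'D' then some 'L'
  else if c = 'R' then some 'D'
  else if c = 'U' then some 'R'
  else if c = 'L' then some 'U'
  else none

def rightF2 (c : Char) : Option Char :=
  if c = 'D' then some 'U'
  else if c = 'R' then some 'R'
  else if c = 'U' then some 'D'
  else if c = 'L' then some 'L'
  else none

theorem rightStep1_eq (acc : List Char) (i : Char) :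
    rightStep1 acc i = acc ++ (rightF1 i).toList := by
  unfold rightStep1 rightF1
  split_ifs with h1 h2 h3 h4 <;> simp_all

theorem rightStep2_eq (acc : List Char) (i : Char) :
    rightStep2 acc i = acc ++ (rightF2 i).toList := by
  unfold rightStep2 rightF2
  split_ifs with h1 h2 h3 h4 <;> simp_all

theorem foldl_step_eq (f : Char → Option Char)
    (step : List Char → Char → List Char)
    (hstep : ∀ acc i, step acc i = acc ++ (f i).toList)
    (l acc : List Char) :
    l.foldl step acc = acc ++ l.filterMap f := by
  induction l generalizing acc with
  | nil => simp
  | cons x xs ih =>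
    simp only [List.foldl_cons, hstep, ih, List.filterMap_cons]
    cases f x <;> simp

theorem right_spec : Claim_equal_right := by
  intro pattern _
  unfold Spec_right right right_alt
  simp only [foldl_step_eq rightF1 rightStep1 rightStep1_eq,
             foldl_step_eq rightF2 rightStep2 rightStep2_eq,
             List.nil_append, List.filterMap_filterMap]
  congr 1
  apply List.filterMap_congr
  intro c _
  unfold rightF1 rightF2 rightMap?
  split_ifs <;> simp_all [Option.bind]
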